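-- pv_equiv track=rewrite | github.com/DivisionSt/oryx-with-custom-qmk | qmk_to_zmk.py | group_ergodox_keys
-- ===== SOURCE A (Python) =====
-- from typing import Dict, List, Tuple, Any
--
-- def group_ergodox_keys(keys: List[str]) -> List[List[str]]:
--     """Group keys into Ergodox layout rows"""
--     # Ergodox layout: 14 keys top row, 14 keys second row, etc.
--     if len(keys) < 76:  # Typical ergodox has 76 keys
--         # Pad with KC_NO if needed
--         keys.extend(['KC_NO'] * (76 - len(keys)))
--
--     # Group into rows (this is simplified - actual Ergodox layout is more complex)
--     rows = []
--     key_index = 0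
--
--     # Row layout for Ergodox (simplified)
--     row_sizes = [7, 7, 7, 7, 7, 7, 5, 3, 3, 7, 7, 7, 7, 7, 7, 5, 3, 3]
--
--     for row_size in row_sizes:
--         if key_index + row_size <= len(keys):
--             rows.append(keys[key_index:key_index + row_size])
--             key_index += row_size
--         else:
--             break
--
--     return rows
-- ===== SOURCE B (Python) =====
-- def group_ergodox_keys(keys):
--     """Group keys into fixed Ergodox rows by recursively peeling prefixes off the list
--     (same in-place padding as the original)."""
--     if len(keys) < 76:
--         keys.extend(['KC_NO'] * (76 - len(keys)))
--
--     def chop(rest, sizes):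
--         if not sizes or len(rest) < sizes[0]:
--             return []
--         return [rest[:sizes[0]]] + chop(rest[sizes[0]:], sizes[1:])
--
--     return chop(keys, [7, 7, 7, 7, 7, 7, 5, 3, 3, 7, 7, 7, 7, 7, 7, 5, 3, 3])
-- ===== Notes on version B (the rewrite author's own statement) =====
-- stated objective: alternative
-- what changed: Replaced the iterative running-index loop with break by a recursive decomposition that consumes the key list itself: each call peels rest[:size] off the remaining suffix and recurses on rest[size:] and the remaining sizes, stopping when the suffix is shorter than the next row; no index is maintained.
import Mathlib
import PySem

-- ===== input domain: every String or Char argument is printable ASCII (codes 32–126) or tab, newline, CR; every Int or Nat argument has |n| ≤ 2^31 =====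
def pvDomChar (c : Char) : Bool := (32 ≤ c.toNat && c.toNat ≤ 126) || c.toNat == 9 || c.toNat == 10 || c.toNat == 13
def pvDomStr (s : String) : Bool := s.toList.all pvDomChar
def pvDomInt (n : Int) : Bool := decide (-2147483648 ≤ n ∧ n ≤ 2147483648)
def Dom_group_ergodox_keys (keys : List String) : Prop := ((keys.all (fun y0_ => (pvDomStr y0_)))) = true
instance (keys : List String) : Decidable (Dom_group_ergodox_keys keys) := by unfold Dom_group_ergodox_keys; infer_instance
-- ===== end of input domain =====

-- B replaces A's running-index loop (break on overrun) by a recursion that peels prefixes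
-- off the remaining suffix of the list; equal return value; both Pythons mutate `keys`
-- in place by the same padding (equivalence here is about the return value).

-- ===== PORT A =====
def gekRowSizes : List Int := [7, 7, 7, 7, 7, 7, 5, 3, 3, 7, 7, 7, 7, 7, 7, 5, 3, 3]

-- the `for row_size in row_sizes` loop with its break, as structural recursion
def gekLoopA (keys : List String) : List Int → Int → List (List String)
  | [], _ => []
  | s :: rest, idx =>
    if idx + s ≤ (keys.length : Int) then
      PySem.List.slice keys (some idx) (some (idx + s)) :: gekLoopA keys rest (idx + s)
    else []

def group_ergodox_keys (keys : List String) : List (List String) :=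
  let keys := if (keys.length : Int) < 76 then keys ++ List.replicate (76 - keys.length) "KC_NO" else keys
  gekLoopA keys gekRowSizes 0

-- ===== PORT B =====
-- chop(rest, sizes): peel rest[:sizes[0]] and recurse on rest[sizes[0]:], sizes[1:]
def gekChop : List Int → List String → List (List String)
  | [], _ => []
  | s :: sizes, rest =>
    if (rest.length : Int) < s then []
    else PySem.List.slice rest none (some s) :: gekChop sizes (PySem.List.slice rest (some s) none)

def group_ergodox_keys_alt (keys : List String) : List (List String) :=
  let keys := if (keys.length : Int) < 76 then keys ++ List.replicate (76 - keys.length) "KC_NO" else keys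
  gekChop [7, 7, 7, 7, 7, 7, 5, 3, 3, 7, 7, 7, 7, 7, 7, 5, 3, 3] keys

-- ===== PRECONDITION & SPEC =====
def Spec_group_ergodox_keys (keys : List String) (out : List (List String)) : Prop := out = group_ergodox_keys_alt keys
instance (keys : List String) (out : List (List String)) : Decidable (Spec_group_ergodox_keys keys out) := by unfold Spec_group_ergodox_keys; infer_instance

-- ===== CLAIM (what is proved, stated in full; the proofs are below) =====
def Claim_equal_group_ergodox_keys : Prop := ∀ (keys : List String), Dom_group_ergodox_keys keys → Spec_group_ergodox_keys keys (group_ergodox_keys keys)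

-- ===== LEMMAS AND PROOFS =====
-- loop invariant: A's indexed break-loop from index `idx` equals B's prefix-peeling
-- recursion on the suffix `keys.drop idx.toNat`, for nonnegative in-range `idx` and
-- positive row sizes.
theorem gek_gen (ks : List String) (sizes : List Int) (hpos : ∀ s ∈ sizes, 0 < s) :
    ∀ idx : Int, 0 ≤ idx → idx ≤ (ks.length : Int) →
      gekLoopA ks sizes idx = gekChop sizes (ks.drop idx.toNat) := by
  induction sizes with
  | nil => intro idx _ _; simp [gekLoopA, gekChop]
  | cons s rest ih =>
    intro idx h0 hle
    have hs : 0 < s := hpos s (by simp)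
    have hlen : ((ks.drop idx.toNat).length : Int) = (ks.length : Int) - idx := by
      simp [List.length_drop]; omega
    simp only [gekLoopA, gekChop]
    by_cases h : idx + s ≤ (ks.length : Int)
    · have hcond : ¬ ((ks.drop idx.toNat).length : Int) < s := by omega
      rw [if_pos h, if_neg hcond]
      have hslice : PySem.List.slice ks (some idx) (some (idx + s)) =
          PySem.List.slice (ks.drop idx.toNat) none (some s) := by
        rw [PySem.List.slice_toNat _ h0 (by omega), PySem.List.slice_to _ (le_of_lt hs)]
        congr 1; omega
      have hdrop : PySem.List.slice (ks.drop idx.toNat) (some s) none =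
          ks.drop (idx + s).toNat := by
        rw [PySem.List.slice_from _ (le_of_lt hs), List.drop_drop]
        congr 1; omega
      rw [hslice, hdrop, ih (fun t ht => hpos t (by simp [ht])) (idx + s) (by omega) h]
    · have hcond : ((ks.drop idx.toNat).length : Int) < s := by omega
      rw [if_neg h, if_pos hcond]

-- ===== VERDICT (by name: the statement is the Claim_ definition above) =====
theorem group_ergodox_keys_spec : Claim_equal_group_ergodox_keys := by
  intro keys _
  unfold Spec_group_ergodox_keys group_ergodox_keys group_ergodox_keys_alt
  dsimp only
  rw [gekRowSizes, gek_gen _ _ (by decide) 0 (by omega) (by positivity)]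
  simp
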